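-- pv_equiv track=rewrite | github.com/zinga0328it/tattoo | web/eternaai/test_colonna_pari.py | trova_colonna_con_piu_pari
-- ===== SOURCE A (Python) =====
-- def trova_colonna_con_piu_pari(matrice):
--     best_count = -1
--     best_col = -1
--     for col in range(len(matrice[0])):
--         count = 0
--         for riga in range(len(matrice)):
--             val = matrice[riga][col]
--             if val % 2 == 0:
--                 count += 1
--         if count > best_count:
--             best_count = count
--             best_col = col
--     return best_col
-- ===== SOURCE B (Python) =====
-- def trova_colonna_con_piu_pari(matrice):
--     ncols = len(matrice[0])
--     counts = [0] * ncols
--     for riga in matrice: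
--         counts = [counts[c] + (1 if riga[c] % 2 == 0 else 0) for c in range(ncols)]
--     best_count = -1
--     best_col = -1
--     for col, cnt in enumerate(counts):
--         if cnt > best_count:
--             best_count = cnt
--             best_col = col
--     return best_col
-- ===== Notes on version B (the rewrite author's own statement) =====
-- stated objective: alternative
-- what changed: B makes a single pass over the rows maintaining a vector of per-column even counts (rebuilt per row), then selects the leftmost argmax in a separate scan over that vector, instead of A's column-outer nested loops that recount each column from scratch by repeated row indexing.
import Mathlib
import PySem

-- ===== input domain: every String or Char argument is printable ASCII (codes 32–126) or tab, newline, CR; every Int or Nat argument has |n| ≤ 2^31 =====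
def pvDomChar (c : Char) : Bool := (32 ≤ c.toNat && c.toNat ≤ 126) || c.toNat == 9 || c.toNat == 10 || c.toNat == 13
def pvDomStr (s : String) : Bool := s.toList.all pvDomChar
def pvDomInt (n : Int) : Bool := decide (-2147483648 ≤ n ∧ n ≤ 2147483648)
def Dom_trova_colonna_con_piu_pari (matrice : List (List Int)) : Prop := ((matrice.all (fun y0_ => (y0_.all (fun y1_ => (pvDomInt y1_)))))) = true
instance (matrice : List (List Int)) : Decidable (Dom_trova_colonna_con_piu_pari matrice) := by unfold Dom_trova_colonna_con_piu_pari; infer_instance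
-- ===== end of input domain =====

-- B replaces A's column-outer recount-per-column nested loops by one row pass maintaining a
-- per-column counts vector followed by a separate leftmost-argmax scan; same cost, different structure.

-- ===== PORT A =====
-- Literal port of A.  matrice[0] and matrice[riga][col] are ported with pyGetD; the defaults
-- are only reachable outside Pre_ (where Python raises IndexError).
def trova_colonna_con_piu_pari (matrice : List (List Int)) : Int :=
  let st := (PySem.List.pyRange 0 ((PySem.List.pyGetD matrice 0 []).length : Int) 1).foldl
    (fun (st : Int × Int) col =>
      let count := (PySem.List.pyRange 0 (matrice.length : Int) 1).foldl
        (fun (count : Int) riga =>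
          let val := PySem.List.pyGetD (PySem.List.pyGetD matrice riga []) col 0
          if PySem.Int.mod val 2 = 0 then count + 1 else count) 0
      if st.1 < count then (count, col) else st) (-1, -1)
  st.2

-- ===== PORT B =====
-- Literal port of Source B: the counts vector is rebuilt per row by a comprehension over range(ncols),
-- then enumerate(counts) is scanned for the leftmost strict maximum.
def trova_colonna_con_piu_pari_alt (matrice : List (List Int)) : Int :=
  let ncols : Int := ((PySem.List.pyGetD matrice 0 []).length : Int)
  let counts := matrice.foldl
    (fun (counts : List Int) riga =>
      (PySem.List.pyRange 0 ncols 1).map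
        (fun c => PySem.List.pyGetD counts c 0 +
          (if PySem.Int.mod (PySem.List.pyGetD riga c 0) 2 = 0 then (1 : Int) else 0)))
    (List.replicate ncols.toNat (0 : Int))
  let st := (PySem.List.enumerate counts).foldl
    (fun (st : Int × Int) p => if st.1 < p.2 then (p.2, p.1) else st) (-1, -1)
  st.2

-- ===== PRECONDITION & SPEC =====
-- Pre_ excludes exactly the inputs where Python A raises IndexError: the empty matrix
-- (matrice[0]) and ragged matrices with a row shorter than the first row (matrice[riga][col]).
def Pre_trova_colonna_con_piu_pari (matrice : List (List Int)) : Prop :=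
  matrice ≠ [] ∧ ∀ row ∈ matrice, (matrice.headD []).length ≤ row.length
instance (matrice : List (List Int)) : Decidable (Pre_trova_colonna_con_piu_pari matrice) := by
  unfold Pre_trova_colonna_con_piu_pari; infer_instance

def pvWitness_trova_colonna_con_piu_pari : List (List Int) := [[1, 2], [3, 4]]

def Spec_trova_colonna_con_piu_pari (matrice : List (List Int)) (out : Int) : Prop := out = trova_colonna_con_piu_pari_alt matrice
instance (matrice : List (List Int)) (out : Int) : Decidable (Spec_trova_colonna_con_piu_pari matrice out) := by unfold Spec_trova_colonna_con_piu_pari; infer_instance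

-- ===== CLAIM (what is proved, stated in full; the proofs are below) =====
def Claim_equal_trova_colonna_con_piu_pari : Prop := ∀ (matrice : List (List Int)), Dom_trova_colonna_con_piu_pari matrice → Pre_trova_colonna_con_piu_pari matrice → Spec_trova_colonna_con_piu_pari matrice (trova_colonna_con_piu_pari matrice)

-- ===== LEMMAS AND PROOFS =====

-- the per-column even count both programs compute
def pvCnt (M : List (List Int)) (c : Int) : Int :=
  M.foldl (fun a r => a + (if PySem.Int.mod (PySem.List.pyGetD r c 0) 2 = 0 then (1 : Int) else 0)) 0

theorem foldl_add_shift (M : List (List Int)) (c : Int) (a : Int) :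
    M.foldl (fun a r => a + (if PySem.Int.mod (PySem.List.pyGetD r c 0) 2 = 0 then (1 : Int) else 0)) a
      = a + pvCnt M c := by
  induction M generalizing a with
  | nil => simp [pvCnt]
  | cons r M ih =>
    simp only [pvCnt, List.foldl_cons]
    rw [ih, ih]
    ring

theorem pvCnt_cons (r : List Int) (M : List (List Int)) (c : Int) :
    pvCnt (r :: M) c
      = (if PySem.Int.mod (PySem.List.pyGetD r c 0) 2 = 0 then (1 : Int) else 0) + pvCnt M c := by
  simp only [pvCnt, List.foldl_cons]
  rw [foldl_add_shift]
  simp [pvCnt]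

-- A's inner loop counts even entries of column c, in if-accumulator form
theorem inner_count (M : List (List Int)) (c : Int) (a : Int) :
    M.foldl (fun (count : Int) r =>
        if PySem.Int.mod (PySem.List.pyGetD r c 0) 2 = 0 then count + 1 else count) a
      = a + pvCnt M c := by
  induction M generalizing a with
  | nil => simp [pvCnt]
  | cons r M ih =>
    simp only [List.foldl_cons]
    rw [ih, pvCnt_cons]
    split <;> ring

-- B's row pass: starting from a range-map, it stays a range-map with pvCnt added pointwise
theorem counts_inv (M : List (List Int)) (n : Int) (g : Int → Int) :
    M.foldl
      (fun (counts : List Int) riga =>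
        (PySem.List.pyRange 0 n 1).map
          (fun c => PySem.List.pyGetD counts c 0 +
            (if PySem.Int.mod (PySem.List.pyGetD riga c 0) 2 = 0 then (1 : Int) else 0)))
      ((PySem.List.pyRange 0 n 1).map g)
      = (PySem.List.pyRange 0 n 1).map (fun c => g c + pvCnt M c) := by
  induction M generalizing g with
  | nil => simp [pvCnt]
  | cons r M ih =>
    simp only [List.foldl_cons]
    have hmap :
        (PySem.List.pyRange 0 n 1).map
          (fun c => PySem.List.pyGetD ((PySem.List.pyRange 0 n 1).map g) c 0 +
            (if PySem.Int.mod (PySem.List.pyGetD r c 0) 2 = 0 then (1 : Int) else 0))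
          = (PySem.List.pyRange 0 n 1).map
            (fun c => g c + (if PySem.Int.mod (PySem.List.pyGetD r c 0) 2 = 0 then (1 : Int) else 0)) := by
      apply List.map_congr_left
      intro c hc
      rw [PySem.List.mem_pyRange_one] at hc
      rw [PySem.List.pyGetD_map_pyRange_of_nonneg g n c 0 hc.1 hc.2]
    rw [hmap, ih]
    apply List.map_congr_left
    intro c _
    rw [pvCnt_cons]
    ring

theorem replicate_eq_map_range (n : Int) :
    List.replicate n.toNat (0 : Int) = (PySem.List.pyRange 0 n 1).map (fun _ => (0 : Int)) := by
  rw [List.map_const']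
  simp [PySem.List.length_pyRange_one]

theorem trova_colonna_con_piu_pari_eq (matrice : List (List Int)) :
    trova_colonna_con_piu_pari matrice = trova_colonna_con_piu_pari_alt matrice := by
  unfold trova_colonna_con_piu_pari trova_colonna_con_piu_pari_alt
  set n : Int := ((PySem.List.pyGetD matrice 0 []).length : Int) with hn
  -- A's inner loop: fold over range(len(matrice)) with pyGetD = fold over the rows
  have hA :
      ∀ col : Int,
        (PySem.List.pyRange 0 (matrice.length : Int) 1).foldl
          (fun (count : Int) riga =>
            if PySem.Int.mod (PySem.List.pyGetD (PySem.List.pyGetD matrice riga []) col 0) 2 = 0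
            then count + 1 else count) 0
          = pvCnt matrice col := by
    intro col
    rw [PySem.List.foldl_pyRange_zero_pyGetD' matrice ([] : List Int)
      (fun (count : Int) (r : List Int) =>
        if PySem.Int.mod (PySem.List.pyGetD r col 0) 2 = 0 then count + 1 else count) 0]
    rw [inner_count]
    ring
  simp only [hA]
  -- B's counts vector is the per-column count table
  have hcounts :
      matrice.foldl
        (fun (counts : List Int) riga =>
          (PySem.List.pyRange 0 n 1).map
            (fun c => PySem.List.pyGetD counts c 0 +
              (if PySem.Int.mod (PySem.List.pyGetD riga c 0) 2 = 0 then (1 : Int) else 0)))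
        (List.replicate n.toNat (0 : Int))
        = (PySem.List.pyRange 0 n 1).map (fun c => pvCnt matrice c) := by
    rw [replicate_eq_map_range, counts_inv]
    apply List.map_congr_left
    intro c _
    ring
  rw [hcounts]
  -- enumerate of the table is the range paired with the counts
  have henum :
      PySem.List.enumerate ((PySem.List.pyRange 0 n 1).map (fun c => pvCnt matrice c))
        = (PySem.List.pyRange 0 n 1).map (fun c => (c, pvCnt matrice c)) := by
    rw [PySem.List.enumerate_eq_map_pyRange (d := 0)]
    have hn0 : 0 ≤ n := by rw [hn]; exact Int.natCast_nonneg _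
    have hlen : PySem.List.len ((PySem.List.pyRange 0 n 1).map (fun c => pvCnt matrice c)) = n := by
      simp [PySem.List.length_pyRange_one]
      omega
    rw [hlen]
    apply List.map_congr_left
    intro c hc
    rw [PySem.List.mem_pyRange_one] at hc
    rw [PySem.List.pyGetD_map_pyRange_of_nonneg (fun c => pvCnt matrice c) n c 0 hc.1 hc.2]
  rw [henum, List.foldl_map]

-- ===== VERDICT (by name: the statement is the Claim_ definition above) =====
theorem trova_colonna_con_piu_pari_spec : Claim_equal_trova_colonna_con_piu_pari := by
  intro matrice _ _
  unfold Spec_trova_colonna_con_piu_pari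
  exact trova_colonna_con_piu_pari_eq matrice
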